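-- pv_equiv track=rewrite | github.com/priyanshuthakker-byte/bid-nobid | pdf_merger.py | _score_doc
-- ===== SOURCE A (Python) =====
-- SUBMISSION_ORDER = [
--     # Priority 1 — Bid forms (always first)
--     ("cover",        1, ["cover_letter", "bid_letter", "covering"]),
--     ("form_1897",    2, ["1897", "affidavit", "emd_affidavit"]),
--     ("emd",          3, ["emd", "msme_emd", "earnest_money", "bid_security"]),
--
--     # Priority 2 — Company docs
--     ("coi",          10, ["incorporation", "coi", "certificate_of_incorporation"]),
--     ("pan",          11, ["pan_card", "pan"]),
--     ("gst",          12, ["gst", "gstin"]),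
--     ("msme",         13, ["msme", "udyam"]),
--
--     # Priority 3 — Financial
--     ("turnover",     20, ["turnover", "ca_certificate", "avg_turnover"]),
--     ("balance_2223", 21, ["balance_2223", "2022_23", "fy22", "p&l"]),
--     ("balance_2324", 22, ["balance_2324", "2023_24", "fy23"]),
--     ("balance_2425", 23, ["balance_2425", "2024_25", "fy24"]),
--     ("net_worth",    24, ["net_worth", "networth"]),
--
--     # Priority 4 — Legal declarations
--     ("non_blacklist",  30, ["non_blacklist", "blacklisting", "debarment", "non_debarment"]),
--     ("financial_und",  31, ["financial_standing", "undertaking", "financial_und"]),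
--     ("mii",            32, ["make_in_india", "mii", "local_content"]),
--
--     # Priority 5 — Certifications
--     ("cmmi",    40, ["cmmi"]),
--     ("iso9001", 41, ["iso_9001", "iso9001", "quality"]),
--     ("iso27001",42, ["iso_27001", "iso27001", "information_security"]),
--     ("iso20000",43, ["iso_20000", "iso20000", "itsm"]),
--
--     # Priority 6 — Experience
--     ("exp_1", 50, ["work_order", "wo_", "completion_cert", "experience"]),
--     ("exp_2", 51, ["exp_", "project_", "client_cert"]),
--
--     # Priority 7 — HR
--     ("emp_strength", 60, ["employee_strength", "epf", "hr"]),
--     ("team_cv",      61, ["cv", "resume", "team"]),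
--
--     # Priority 8 — Technical
--     ("tech_proposal", 70, ["technical_proposal", "techproposal", "tech_prop"]),
--     ("methodology",   71, ["methodology", "approach", "technical_approach"]),
--     ("timeline",      72, ["timeline", "gantt", "schedule"]),
--
--     # Priority 9 — Forms/Annexures (variable, go last before stamp)
--     ("form_",   80, ["form_", "annexure", "annex", "appendix", "schedule"]),
--
--     # Priority 10 — Stamp papers (always last)
--     ("stamp",   90, ["stamp_paper", "stamp", "non_judicial"]),
--
--     # Priority 99 — Unknown docs (append at end)
--     ("other",   99, []),
-- ]
--
-- def _score_doc(filename: str) -> int: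
--     """Return sort priority for a document based on filename."""
--     fname = filename.lower().replace(" ", "_").replace("-", "_")
--     for _, priority, keywords in SUBMISSION_ORDER:
--         if keywords:
--             for kw in keywords:
--                 if kw in fname:
--                     return priority
--     return 99  # Unknown — append at end
-- ===== SOURCE B (Python) =====
-- _KEYWORD_PRIORITY = [
--     ('cover_letter', 1),
--     ('bid_letter', 1),
--     ('covering', 1),
--     ('1897', 2),
--     ('affidavit', 2),
--     ('emd_affidavit', 2),
--     ('emd', 3),
--     ('msme_emd', 3),
--     ('earnest_money', 3),
--     ('bid_security', 3),
--     ('incorporation', 10),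
--     ('coi', 10),
--     ('certificate_of_incorporation', 10),
--     ('pan_card', 11),
--     ('pan', 11),
--     ('gst', 12),
--     ('gstin', 12),
--     ('msme', 13),
--     ('udyam', 13),
--     ('turnover', 20),
--     ('ca_certificate', 20),
--     ('avg_turnover', 20),
--     ('balance_2223', 21),
--     ('2022_23', 21),
--     ('fy22', 21),
--     ('p&l', 21),
--     ('balance_2324', 22),
--     ('2023_24', 22),
--     ('fy23', 22),
--     ('balance_2425', 23),
--     ('2024_25', 23),
--     ('fy24', 23),
--     ('net_worth', 24),
--     ('networth', 24),
--     ('non_blacklist', 30),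
--     ('blacklisting', 30),
--     ('debarment', 30),
--     ('non_debarment', 30),
--     ('financial_standing', 31),
--     ('undertaking', 31),
--     ('financial_und', 31),
--     ('make_in_india', 32),
--     ('mii', 32),
--     ('local_content', 32),
--     ('cmmi', 40),
--     ('iso_9001', 41),
--     ('iso9001', 41),
--     ('quality', 41),
--     ('iso_27001', 42),
--     ('iso27001', 42),
--     ('information_security', 42),
--     ('iso_20000', 43),
--     ('iso20000', 43),
--     ('itsm', 43),
--     ('work_order', 50),
--     ('wo_', 50),
--     ('completion_cert', 50),
--     ('experience', 50),
--     ('exp_', 51),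
--     ('project_', 51),
--     ('client_cert', 51),
--     ('employee_strength', 60),
--     ('epf', 60),
--     ('hr', 60),
--     ('cv', 61),
--     ('resume', 61),
--     ('team', 61),
--     ('technical_proposal', 70),
--     ('techproposal', 70),
--     ('tech_prop', 70),
--     ('methodology', 71),
--     ('approach', 71),
--     ('technical_approach', 71),
--     ('timeline', 72),
--     ('gantt', 72),
--     ('schedule', 72),
--     ('form_', 80),
--     ('annexure', 80),
--     ('annex', 80),
--     ('appendix', 80),
--     ('schedule', 80),
--     ('stamp_paper', 90),
--     ('stamp', 90),
--     ('non_judicial', 90),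
-- ]
--
-- def _score_doc(filename: str) -> int:
--     """Return sort priority: single pass over a flat keyword->priority index,
--     keeping the smallest priority among matches (99 if none). Equivalent to
--     A's first-match scan because the table's priorities are increasing."""
--     fname = filename.lower().replace(" ", "_").replace("-", "_")
--     best = 99
--     for kw, p in _KEYWORD_PRIORITY:
--         if kw in fname and p < best:
--             best = p
--     return best
-- ===== Notes on version B (the rewrite author's own statement) =====
-- stated objective: alternative
-- what changed: A scans the nested (name, priority, keywords) table with nested loops and returns on the first matching keyword; B flattens the table into a flat keyword->priority index and makes one pass with a running-minimum accumulator (default 99) - equal because the table's priorities are increasing.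
import Mathlib
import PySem

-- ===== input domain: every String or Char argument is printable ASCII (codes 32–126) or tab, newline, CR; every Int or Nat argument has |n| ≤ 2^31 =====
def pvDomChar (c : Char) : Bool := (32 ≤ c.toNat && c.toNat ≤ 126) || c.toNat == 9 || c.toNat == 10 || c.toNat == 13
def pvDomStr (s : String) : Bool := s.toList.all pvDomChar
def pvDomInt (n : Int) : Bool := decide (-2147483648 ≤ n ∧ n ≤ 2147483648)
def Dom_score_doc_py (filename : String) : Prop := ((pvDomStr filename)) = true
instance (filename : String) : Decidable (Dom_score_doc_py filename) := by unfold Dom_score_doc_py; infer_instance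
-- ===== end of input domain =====

-- B flattens the nested keyword table into a flat keyword->priority index and makes
-- one pass with a running-minimum accumulator (default 99); equal to A's first-match
-- early-return scan because the table's priorities are increasing. Objective:
-- alternative decomposition, no speed claim.

-- ===== PORT A =====
-- A's nested constant table SUBMISSION_ORDER: (name, priority, keywords)
def pvTable : List (String × Int × List String) :=
  [("cover",        1, ["cover_letter", "bid_letter", "covering"]),
   ("form_1897",    2, ["1897", "affidavit", "emd_affidavit"]),
   ("emd",          3, ["emd", "msme_emd", "earnest_money", "bid_security"]),
   ("coi",          10, ["incorporation", "coi", "certificate_of_incorporation"]),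
   ("pan",          11, ["pan_card", "pan"]),
   ("gst",          12, ["gst", "gstin"]),
   ("msme",         13, ["msme", "udyam"]),
   ("turnover",     20, ["turnover", "ca_certificate", "avg_turnover"]),
   ("balance_2223", 21, ["balance_2223", "2022_23", "fy22", "p&l"]),
   ("balance_2324", 22, ["balance_2324", "2023_24", "fy23"]),
   ("balance_2425", 23, ["balance_2425", "2024_25", "fy24"]),
   ("net_worth",    24, ["net_worth", "networth"]),
   ("non_blacklist",  30, ["non_blacklist", "blacklisting", "debarment", "non_debarment"]),
   ("financial_und",  31, ["financial_standing", "undertaking", "financial_und"]),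
   ("mii",            32, ["make_in_india", "mii", "local_content"]),
   ("cmmi",    40, ["cmmi"]),
   ("iso9001", 41, ["iso_9001", "iso9001", "quality"]),
   ("iso27001",42, ["iso_27001", "iso27001", "information_security"]),
   ("iso20000",43, ["iso_20000", "iso20000", "itsm"]),
   ("exp_1", 50, ["work_order", "wo_", "completion_cert", "experience"]),
   ("exp_2", 51, ["exp_", "project_", "client_cert"]),
   ("emp_strength", 60, ["employee_strength", "epf", "hr"]),
   ("team_cv",      61, ["cv", "resume", "team"]),
   ("tech_proposal", 70, ["technical_proposal", "techproposal", "tech_prop"]),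
   ("methodology",   71, ["methodology", "approach", "technical_approach"]),
   ("timeline",      72, ["timeline", "gantt", "schedule"]),
   ("form_",   80, ["form_", "annexure", "annex", "appendix", "schedule"]),
   ("stamp",   90, ["stamp_paper", "stamp", "non_judicial"]),
   ("other",   99, [])]

-- inner 'for kw in keywords: if kw in fname: return priority'
def pvInnerA (priority : Int) (kws : List String) (fname : String) : Option Int :=
  match kws with
  | [] => none
  | kw :: rest => if PySem.Str.isIn kw fname then some priority else pvInnerA priority rest fname

-- outer 'for _, priority, keywords in SUBMISSION_ORDER: if keywords: …' ; falls out to 99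
def pvOuterA (table : List (String × Int × List String)) (fname : String) : Int :=
  match table with
  | [] => 99
  | (_, priority, keywords) :: rest =>
    if ¬ keywords.isEmpty then
      match pvInnerA priority keywords fname with
      | some r => r
      | none => pvOuterA rest fname
    else pvOuterA rest fname

def score_doc_py (filename : String) : Int :=
  let fname := PySem.Str.replace (PySem.Str.replace (PySem.Str.lower filename) " " "_") "-" "_"
  pvOuterA pvTable fname

-- ===== PORT B =====
-- B's flat constant index _KEYWORD_PRIORITY: (keyword, priority)
def pvFlat : List (String × Int) :=
  [("cover_letter", 1), ("bid_letter", 1), ("covering", 1),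
   ("1897", 2), ("affidavit", 2), ("emd_affidavit", 2),
   ("emd", 3), ("msme_emd", 3), ("earnest_money", 3), ("bid_security", 3),
   ("incorporation", 10), ("coi", 10), ("certificate_of_incorporation", 10),
   ("pan_card", 11), ("pan", 11),
   ("gst", 12), ("gstin", 12),
   ("msme", 13), ("udyam", 13),
   ("turnover", 20), ("ca_certificate", 20), ("avg_turnover", 20),
   ("balance_2223", 21), ("2022_23", 21), ("fy22", 21), ("p&l", 21),
   ("balance_2324", 22), ("2023_24", 22), ("fy23", 22),
   ("balance_2425", 23), ("2024_25", 23), ("fy24", 23),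
   ("net_worth", 24), ("networth", 24),
   ("non_blacklist", 30), ("blacklisting", 30), ("debarment", 30), ("non_debarment", 30),
   ("financial_standing", 31), ("undertaking", 31), ("financial_und", 31),
   ("make_in_india", 32), ("mii", 32), ("local_content", 32),
   ("cmmi", 40),
   ("iso_9001", 41), ("iso9001", 41), ("quality", 41),
   ("iso_27001", 42), ("iso27001", 42), ("information_security", 42),
   ("iso_20000", 43), ("iso20000", 43), ("itsm", 43),
   ("work_order", 50), ("wo_", 50), ("completion_cert", 50), ("experience", 50),
   ("exp_", 51), ("project_", 51), ("client_cert", 51),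
   ("employee_strength", 60), ("epf", 60), ("hr", 60),
   ("cv", 61), ("resume", 61), ("team", 61),
   ("technical_proposal", 70), ("techproposal", 70), ("tech_prop", 70),
   ("methodology", 71), ("approach", 71), ("technical_approach", 71),
   ("timeline", 72), ("gantt", 72), ("schedule", 72),
   ("form_", 80), ("annexure", 80), ("annex", 80), ("appendix", 80), ("schedule", 80),
   ("stamp_paper", 90), ("stamp", 90), ("non_judicial", 90)]

-- 'best = 99; for kw, p in _KEYWORD_PRIORITY: if kw in fname and p < best: best = p'
def score_doc_py_alt (filename : String) : Int :=
  let fname := PySem.Str.replace (PySem.Str.replace (PySem.Str.lower filename) " " "_") "-" "_"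
  pvFlat.foldl (fun best kp => if PySem.Str.isIn kp.1 fname ∧ kp.2 < best then kp.2 else best) 99

-- ===== PRECONDITION & SPEC =====
def Spec_score_doc_py (filename : String) (out : Int) : Prop := out = score_doc_py_alt filename
instance (filename : String) (out : Int) : Decidable (Spec_score_doc_py filename out) := by unfold Spec_score_doc_py; infer_instance

-- ===== CLAIM (what is proved, stated in full; the proofs are below) =====
def Claim_equal_score_doc_py : Prop := ∀ (filename : String), Dom_score_doc_py filename → Spec_score_doc_py filename (score_doc_py filename)

-- ===== LEMMAS AND PROOFS =====

-- flattening A's nested table into B's flat index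
def pvFlatten (t : List (String × Int × List String)) : List (String × Int) :=
  t.flatMap (fun e => e.2.2.map (fun kw => (kw, e.2.1)))

theorem pv_flat_eq : pvFlat = pvFlatten pvTable := by decide

-- B's loop step is a running minimum over the matching pairs
def pvStep (fname : String) (best : Int) (kp : String × Int) : Int :=
  if PySem.Str.isIn kp.1 fname ∧ kp.2 < best then kp.2 else best

theorem pv_foldl_le_init (fname : String) (L : List (String × Int)) (a : Int) :
    L.foldl (pvStep fname) a ≤ a := by
  induction L generalizing a with
  | nil => simp [List.foldl]
  | cons kp rest ih =>
    simp only [List.foldl]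
    refine le_trans (ih _) ?_
    simp only [pvStep]
    split_ifs with h
    · omega
    · omega

theorem pv_foldl_ge (fname : String) (L : List (String × Int)) (a p : Int)
    (hpa : p ≤ a) (hmem : ∀ kp ∈ L, PySem.Str.isIn kp.1 fname = true → p ≤ kp.2) :
    p ≤ L.foldl (pvStep fname) a := by
  induction L generalizing a with
  | nil => simpa [List.foldl] using hpa
  | cons kp rest ih =>
    simp only [List.foldl]
    refine ih _ ?_ (fun q hq hqm => hmem q (List.mem_cons_of_mem _ hq) hqm)
    simp only [pvStep]
    split_ifs with h
    · exact hmem kp List.mem_cons_self h.1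
    · exact hpa

theorem pv_foldl_le_match (fname : String) (L : List (String × Int)) (a : Int)
    (kp : String × Int) (hmem : kp ∈ L) (hmatch : PySem.Str.isIn kp.1 fname = true) :
    L.foldl (pvStep fname) a ≤ kp.2 := by
  induction L generalizing a with
  | nil => exact absurd hmem List.not_mem_nil
  | cons hd rest ih =>
    rcases List.mem_cons.mp hmem with rfl | hmem'
    · simp only [List.foldl]
      refine le_trans (pv_foldl_le_init fname rest _) ?_
      simp only [pvStep]
      split_ifs with h
      · omega
      · push Not at h
        exact h hmatch
    · exact ih _ hmem'

theorem pv_foldl_skip (fname : String) (L : List (String × Int)) (a : Int)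
    (hnone : ∀ kp ∈ L, PySem.Str.isIn kp.1 fname = false) :
    L.foldl (pvStep fname) a = a := by
  induction L generalizing a with
  | nil => rfl
  | cons kp rest ih =>
    have h0 := hnone kp List.mem_cons_self
    simp only [List.foldl, pvStep, h0]
    simpa using ih _ (fun q hq => hnone q (List.mem_cons_of_mem _ hq))

-- the inner loop of A returns `some priority` exactly when some keyword matches
theorem pv_innerA_eq (p : Int) (kws : List String) (fname : String) :
    pvInnerA p kws fname = if kws.any (fun kw => PySem.Str.isIn kw fname) then some p else none := by
  induction kws with
  | nil => rfl
  | cons kw rest ih =>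
    cases h : PySem.Chars.isIn kw.toList fname.toList
    · simp [pvInnerA, ih, h]
    · simp [pvInnerA, h]

-- every pair in the flattened table carries some entry's priority
theorem pv_mem_flatten (t : List (String × Int × List String)) (kp : String × Int)
    (h : kp ∈ pvFlatten t) : ∃ e ∈ t, kp.2 = e.2.1 := by
  simp only [pvFlatten, List.mem_flatMap, List.mem_map] at h
  obtain ⟨e, he, kw, _, rfl⟩ := h
  exact ⟨e, he, rfl⟩

-- main invariant: on a priority-increasing table bounded by 99,
-- A's first-match scan equals B's running minimum from 99 over the flattened table
theorem pv_main (fname : String) (t : List (String × Int × List String))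
    (hsort : t.Pairwise (fun x y => x.2.1 ≤ y.2.1))
    (hb : ∀ e ∈ t, e.2.1 ≤ 99) :
    (pvFlatten t).foldl (pvStep fname) 99 = pvOuterA t fname := by
  induction t with
  | nil => rfl
  | cons e rest ih =>
    obtain ⟨name, p, kws⟩ := e
    rcases List.pairwise_cons.mp hsort with ⟨hhead, htail⟩
    have hflat : pvFlatten ((name, p, kws) :: rest)
        = kws.map (fun kw => (kw, p)) ++ pvFlatten rest := by
      simp [pvFlatten]
    by_cases hmatch : ∃ kw ∈ kws, PySem.Chars.isIn kw.toList fname.toList = true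
    · -- some keyword matches: A returns p, B's running minimum settles at p
      obtain ⟨kw0, hkw0, hkw0m⟩ := hmatch
      have hkne : kws.isEmpty = false := by
        cases kws with
        | nil => exact absurd hkw0 List.not_mem_nil
        | cons _ _ => rfl
      have hex : ∃ x ∈ kws, PySem.Chars.isIn x.toList fname.toList = true :=
        ⟨kw0, hkw0, hkw0m⟩
      have hA : pvOuterA ((name, p, kws) :: rest) fname = p := by
        simp [pvOuterA, hkne, pv_innerA_eq, hex]
      rw [hA]
      apply le_antisymm
      · refine pv_foldl_le_match fname _ 99 (kw0, p) ?_ (by simpa using hkw0m)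
        rw [hflat]
        exact List.mem_append_left _ (List.mem_map.mpr ⟨kw0, hkw0, rfl⟩)
      · refine pv_foldl_ge fname _ 99 p (hb _ List.mem_cons_self) ?_
        intro kp hkp _
        rw [hflat] at hkp
        rcases List.mem_append.mp hkp with hkp | hkp
        · obtain ⟨_, _, rfl⟩ := List.mem_map.mp hkp
          exact le_refl p
        · obtain ⟨e', he', heq⟩ := pv_mem_flatten rest kp hkp
          rw [heq]
          exact hhead e' he'
    · -- no keyword of this entry matches: both sides simply move on
      have hskip : (kws.map (fun kw => (kw, p))).foldl (pvStep fname) 99 = 99 := by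
        refine pv_foldl_skip fname _ 99 ?_
        intro kp hkp
        obtain ⟨kw, hkw, rfl⟩ := List.mem_map.mp hkp
        simp only [PySem.Str.isIn]
        cases h : PySem.Chars.isIn kw.toList fname.toList
        · rfl
        · exact absurd ⟨kw, hkw, h⟩ hmatch
      have hA : pvOuterA ((name, p, kws) :: rest) fname = pvOuterA rest fname := by
        cases hk : kws.isEmpty
        · simp [pvOuterA, hk, pv_innerA_eq, hmatch]
        · simp [pvOuterA, hk]
      rw [hA, hflat, List.foldl_append, hskip]
      exact ih htail (fun e' he' => hb e' (List.mem_cons_of_mem _ he'))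

-- ===== VERDICT (by name: the statement is the Claim_ definition above) =====
theorem score_doc_py_spec : Claim_equal_score_doc_py := by
  intro filename _
  unfold Spec_score_doc_py score_doc_py score_doc_py_alt
  rw [pv_flat_eq]
  exact (pv_main _ pvTable (by decide) (by decide)).symm
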